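-- pv_equiv track=rewrite | github.com/pypi-data/pypi-code-84 | seanalgorithms3/seanalgorithms3-0.4-py3-none-any.whl/sort/most_profit_workers.py | max_profit_worker
-- ===== SOURCE A (Python) =====
-- def max_profit_worker(difficulty, profit, worker):
--     jobs = sorted([a, b] for a, b in zip(difficulty, profit))
--
--     result = maxx = i = 0
--     for skill in sorted(worker):
--         while i < len(jobs) and skill >= jobs[i][0]:
--             maxx = max(maxx, jobs[i][1])
--             i += 1
--         result += maxx
--
--     return result
-- ===== SOURCE B (Python) =====
-- from bisect import bisect_right
--
--
-- def max_profit_worker(difficulty, profit, worker):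
--     jobs = sorted(zip(difficulty, profit))
--     diffs = [d for d, _ in jobs]
--     best = []
--     m = 0
--     for _, p in jobs:
--         m = max(m, p)
--         best.append(m)
--     total = 0
--     for skill in worker:
--         i = bisect_right(diffs, skill)
--         if i:
--             total += best[i - 1]
--     return total
-- ===== Notes on version B (the rewrite author's own statement) =====
-- stated objective: idiomatic
-- what changed: Replaced the sorted-worker two-pointer merge loop by a prefix-maximum array over the sorted jobs plus a bisect_right lookup per worker (no sorting of workers, order-independent per-worker contributions).
import Mathlib
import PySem

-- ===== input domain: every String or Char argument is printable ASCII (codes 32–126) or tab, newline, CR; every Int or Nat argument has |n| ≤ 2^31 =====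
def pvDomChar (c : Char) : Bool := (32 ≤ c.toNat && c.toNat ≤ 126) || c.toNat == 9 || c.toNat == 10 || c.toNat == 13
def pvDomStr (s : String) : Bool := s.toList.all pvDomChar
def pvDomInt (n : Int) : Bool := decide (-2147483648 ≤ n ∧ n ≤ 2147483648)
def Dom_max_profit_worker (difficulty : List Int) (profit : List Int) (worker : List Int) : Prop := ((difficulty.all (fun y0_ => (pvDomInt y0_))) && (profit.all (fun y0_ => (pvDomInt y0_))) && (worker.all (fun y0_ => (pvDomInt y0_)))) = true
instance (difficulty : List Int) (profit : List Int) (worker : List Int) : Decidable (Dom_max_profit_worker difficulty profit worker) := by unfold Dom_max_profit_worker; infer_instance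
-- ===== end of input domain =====

-- B replaces A's sorted-worker two-pointer loop by a prefix-maximum array over the
-- sorted jobs plus a bisect_right lookup per worker (idiomatic; same asymptotic cost).


-- ===== PORT A =====
-- A's inner 'while i < len(jobs) and skill >= jobs[i][0]' loop: the index i only
-- advances, so it is carried as the remaining suffix of jobs.
def pvAWhile (skill : Int) (rem : List (Int × Int)) (maxx : Int) : List (Int × Int) × Int :=
  match rem with
  | [] => ([], maxx)
  | j :: rest => if skill ≥ j.1 then pvAWhile skill rest (max maxx j.2) else (j :: rest, maxx)

-- A's 'for skill in sorted(worker)' loop with state (rem = jobs[i:], maxx, result).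
def pvALoop (ws : List Int) (rem : List (Int × Int)) (maxx result : Int) : Int :=
  match ws with
  | [] => result
  | s :: rest =>
      let st := pvAWhile s rem maxx
      pvALoop rest st.1 st.2 (result + st.2)

def max_profit_worker (difficulty : List Int) (profit : List Int) (worker : List Int) : Int :=
  -- sorted([a, b] for a, b in zip(...)) sorts the pairs lexicographically
  let jobs := PySem.List.sorted2 (difficulty.zip profit) Prod.fst Prod.snd
  pvALoop (PySem.List.sorted worker (fun x => x)) jobs 0 0

-- ===== PORT B =====
def max_profit_worker_alt (difficulty : List Int) (profit : List Int) (worker : List Int) : Int :=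
  let jobs := PySem.List.sorted2 (difficulty.zip profit) Prod.fst Prod.snd
  let diffs := jobs.map Prod.fst
  -- 'for _, p in jobs: m = max(m, p); best.append(m)'
  let best := (jobs.foldl (fun (acc : List Int × Int) j =>
      (acc.1 ++ [max acc.2 j.2], max acc.2 j.2)) ([], 0)).1
  -- 'for skill in worker: i = bisect_right(diffs, skill); if i: total += best[i-1]'
  worker.foldl (fun total s =>
    let i := PySem.List.bisectRight diffs s
    if i ≠ 0 then total + best.getD (i - 1) 0 else total) 0

-- ===== PRECONDITION & SPEC =====
def Spec_max_profit_worker (difficulty : List Int) (profit : List Int) (worker : List Int) (out : Int) : Prop := out = max_profit_worker_alt difficulty profit worker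
instance (difficulty : List Int) (profit : List Int) (worker : List Int) (out : Int) : Decidable (Spec_max_profit_worker difficulty profit worker out) := by unfold Spec_max_profit_worker; infer_instance

-- ===== CLAIM (what is proved, stated in full; the proofs are below) =====
def Claim_equal_max_profit_worker : Prop := ∀ (difficulty : List Int) (profit : List Int) (worker : List Int), Dom_max_profit_worker difficulty profit worker → Spec_max_profit_worker difficulty profit worker (max_profit_worker difficulty profit worker)

-- ===== LEMMAS AND PROOFS =====

-- the common per-skill value: running max (floored at 0) of the profits of the
-- jobs whose difficulty is ≤ s, taken over the leading such segment of jobs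
def pvVal (jobs : List (Int × Int)) (s : Int) : Int :=
  ((jobs.takeWhile (fun j => decide (j.1 ≤ s))).map Prod.snd).foldl max 0

lemma pvAWhile_eq (s : Int) : ∀ (rem : List (Int × Int)) (maxx : Int),
    pvAWhile s rem maxx =
      (rem.dropWhile (fun j => decide (j.1 ≤ s)),
       ((rem.takeWhile (fun j => decide (j.1 ≤ s))).map Prod.snd).foldl max maxx) := by
  intro rem
  induction rem with
  | nil => intro maxx; simp [pvAWhile]
  | cons j rest ih =>
      intro maxx
      by_cases h : j.1 ≤ s
      · simp [pvAWhile, h, ge_iff_le, ih]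
      · simp [pvAWhile, h, ge_iff_le]

lemma pv_takeWhile_append_of_all {α : Type} (p : α → Bool) (l1 l2 : List α)
    (h : ∀ a ∈ l1, p a = true) : (l1 ++ l2).takeWhile p = l1 ++ l2.takeWhile p := by
  induction l1 with
  | nil => simp
  | cons a t ih =>
      have ha : p a = true := h a (by simp)
      simp only [List.cons_append, List.takeWhile_cons, ha, if_true]
      rw [ih (fun b hb => h b (by simp [hb]))]

lemma pvALoop_eq (jobs : List (Int × Int)) :
    ∀ (ws : List Int), ws.Pairwise (· ≤ ·) →
    ∀ (done rem : List (Int × Int)) (result : Int),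
      done ++ rem = jobs →
      (∀ j ∈ done, ∀ s ∈ ws, j.1 ≤ s) →
      pvALoop ws rem ((done.map Prod.snd).foldl max 0) result
        = result + (ws.map (pvVal jobs)).sum := by
  intro ws
  induction ws with
  | nil => intro _ done rem result _ _; simp [pvALoop]
  | cons s rest ih =>
      intro hpw done rem result hsplit hdone
      have hrest : rest.Pairwise (· ≤ ·) := hpw.of_cons
      have hs_le : ∀ t ∈ rest, s ≤ t := fun t ht => (List.pairwise_cons.mp hpw).1 t ht
      set p : (Int × Int) → Bool := fun j => decide (j.1 ≤ s) with hp
      have hdone_p : ∀ j ∈ done, p j = true := by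
        intro j hj; simp [hp]; exact hdone j hj s (by simp)
      have hstep : pvALoop (s :: rest) rem ((done.map Prod.snd).foldl max 0) result
          = pvALoop rest (rem.dropWhile p)
              (((done ++ rem.takeWhile p).map Prod.snd).foldl max 0)
              (result + (((done ++ rem.takeWhile p).map Prod.snd).foldl max 0)) := by
        simp only [pvALoop, pvAWhile_eq, hp]
        simp [List.map_append, List.foldl_append]
      rw [hstep]
      have hsplit' : (done ++ rem.takeWhile p) ++ rem.dropWhile p = jobs := by
        rw [List.append_assoc, List.takeWhile_append_dropWhile]; exact hsplit
      have hdone' : ∀ j ∈ done ++ rem.takeWhile p, ∀ t ∈ rest, j.1 ≤ t := by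
        intro j hj t ht
        rcases List.mem_append.mp hj with hj | hj
        · exact hdone j hj t (by simp [ht])
        · have hjp : p j = true := List.mem_takeWhile_imp hj
          have : j.1 ≤ s := by simpa [hp] using hjp
          exact le_trans this (hs_le t ht)
      rw [ih hrest (done ++ rem.takeWhile p) (rem.dropWhile p) _ hsplit' hdone']
      have hval : pvVal jobs s = ((done ++ rem.takeWhile p).map Prod.snd).foldl max 0 := by
        have htw : jobs.takeWhile p = done ++ rem.takeWhile p := by
          rw [← hsplit]; exact pv_takeWhile_append_of_all p done rem hdone_p
        unfold pvVal
        rw [← hp, htw]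
      rw [List.map_cons, List.sum_cons, hval]
      ring

-- B's prefix-maximum list, written as a pure recursion for reasoning
def pvBest (m : Int) : List (Int × Int) → List Int
  | [] => []
  | j :: rest => max m j.2 :: pvBest (max m j.2) rest

lemma pvBestFold (jobs : List (Int × Int)) : ∀ (l : List Int) (m : Int),
    jobs.foldl (fun (acc : List Int × Int) j =>
      (acc.1 ++ [max acc.2 j.2], max acc.2 j.2)) (l, m)
      = (l ++ pvBest m jobs, ((jobs.map Prod.snd).foldl max m)) := by
  induction jobs with
  | nil => intro l m; simp [pvBest]
  | cons j rest ih => intro l m; simp [pvBest, ih]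

lemma pvBest_getElem? (jobs : List (Int × Int)) : ∀ (m : Int) (k : Nat), k < jobs.length →
    (pvBest m jobs)[k]? = some (((jobs.take (k + 1)).map Prod.snd).foldl max m) := by
  induction jobs with
  | nil => intro m k hk; simp at hk
  | cons j rest ih =>
      intro m k hk
      cases k with
      | zero => simp [pvBest]
      | succ k =>
          have hk' : k < rest.length := by simpa using hk
          simp [pvBest, ih (max m j.2) k hk']

-- small takeWhile facts used below (proved by structural induction)
lemma pv_length_takeWhile_le {α : Type} (q : α → Bool) : ∀ (l : List α),
    (l.takeWhile q).length ≤ l.length := by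
  intro l
  induction l with
  | nil => simp
  | cons x rest ih =>
      by_cases hx : q x = true <;> simp [List.takeWhile_cons, hx] <;> omega

lemma pv_takeWhile_pred {α : Type} (q : α → Bool) : ∀ (l : List α) (i : Nat)
    (hl : i < l.length), i < (l.takeWhile q).length → q (l[i]'hl) = true := by
  intro l
  induction l with
  | nil => intro i hl; simp at hl
  | cons x rest ih =>
      intro i hl h
      by_cases hx : q x = true
      · cases i with
        | zero => simpa using hx
        | succ i =>
            have : i < (rest.takeWhile q).length := by
              simpa [List.takeWhile_cons, hx] using h
            simpa using ih i (by simpa using hl) this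
      · simp [hx] at h

lemma pv_takeWhile_not_head {α : Type} (q : α → Bool) : ∀ (l : List α)
    (h : (l.takeWhile q).length < l.length),
    q (l[(l.takeWhile q).length]'h) = false := by
  intro l
  induction l with
  | nil => intro h; simp at h
  | cons x rest ih =>
      intro h
      by_cases hx : q x = true
      · have h' : (rest.takeWhile q).length < rest.length := by
          simpa [List.takeWhile_cons, hx] using h
        simpa [List.takeWhile_cons, hx] using ih h'
      · simp [List.takeWhile_cons, hx]

lemma pv_take_takeWhile {α : Type} (q : α → Bool) : ∀ (l : List α),
    l.take ((l.takeWhile q).length) = l.takeWhile q := by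
  intro l
  induction l with
  | nil => simp
  | cons x rest ih =>
      by_cases hx : q x = true <;> simp [hx, ih]

-- on a ≤-sorted list, bisectRight is the length of the leading ≤-segment
lemma pv_bisect_eq_takeWhile (xs : List Int) (x : Int)
    (hxs : xs.Pairwise (· ≤ ·)) :
    PySem.List.bisectRight xs x = (xs.takeWhile (fun a => decide (a ≤ x))).length := by
  obtain ⟨hle, hlt, hgt⟩ := PySem.List.bisectRight_spec xs x hxs
  set i := PySem.List.bisectRight xs x with hi
  set t := (xs.takeWhile (fun a => decide (a ≤ x))).length with ht
  have htle : t ≤ xs.length := pv_length_takeWhile_le _ xs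
  rcases Nat.lt_trichotomy i t with h | h | h
  · -- i < t: xs[i] ≤ x from takeWhile, but the spec says x < xs[i]
    have hilen : i < xs.length := lt_of_lt_of_le h htle
    have : xs[i] ≤ x := by
      have := pv_takeWhile_pred (fun a => decide (a ≤ x)) xs i hilen h
      simpa using this
    exact absurd this (not_le.mpr (hgt i hilen (le_refl i)))
  · exact h
  · -- t < i: the spec says xs[t] ≤ x, but takeWhile stopped at t
    have htlen : t < xs.length := lt_of_lt_of_le h hle
    have h1 : xs[t] ≤ x := hlt t htlen h
    have h2 := pv_takeWhile_not_head (fun a => decide (a ≤ x)) xs htlen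
    simp at h2
    exact absurd h1 (not_le.mpr h2)

-- handing Pairwise down through insertBy / the insertion-sort fold
lemma pv_pairwise_insertBy {α : Type} {R : α → α → Prop} {before : α → α → Bool}
    (htrans : ∀ a b c, R a b → R b c → R a c)
    (htot : ∀ a b, (before a b = true → R a b) ∧ (before a b = false → R b a)) :
    ∀ (ys : List α) (x : α), ys.Pairwise R → (PySem.List.insertBy before x ys).Pairwise R := by
  intro ys
  induction ys with
  | nil => intro x _; simp [PySem.List.insertBy]
  | cons y rest ih =>
      intro x hp
      by_cases hb : before x y = true
      · have hxy : R x y := (htot x y).1 hb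
        simp only [PySem.List.insertBy, hb, if_true]
        refine List.pairwise_cons.mpr ⟨?_, hp⟩
        intro z hz
        rcases List.mem_cons.mp hz with rfl | hz
        · exact hxy
        · exact htrans _ _ _ hxy ((List.pairwise_cons.mp hp).1 z hz)
      · have hyx : R y x := (htot x y).2 (by simpa using hb)
        simp only [PySem.List.insertBy, hb]
        refine List.pairwise_cons.mpr ⟨?_, ih x hp.of_cons⟩
        intro z hz
        rcases (PySem.List.mem_insertBy before x z rest).mp hz with rfl | hz
        · exact hyx
        · exact (List.pairwise_cons.mp hp).1 z hz
  
lemma pv_pairwise_foldl_insertBy {α : Type} {R : α → α → Prop} {before : α → α → Bool}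
    (htrans : ∀ a b c, R a b → R b c → R a c)
    (htot : ∀ a b, (before a b = true → R a b) ∧ (before a b = false → R b a)) :
    ∀ (xs : List α) (acc : List α), acc.Pairwise R →
      (xs.foldl (fun acc x => PySem.List.insertBy before x acc) acc).Pairwise R := by
  intro xs
  induction xs with
  | nil => intro acc h; simpa
  | cons x rest ih =>
      intro acc h
      exact ih _ (pv_pairwise_insertBy htrans htot acc x h)

lemma pv_jobs_pairwise (xs : List (Int × Int)) :
    (PySem.List.sorted2 xs Prod.fst Prod.snd).Pairwise (fun a b => a.1 ≤ b.1) := by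
  have := pv_pairwise_foldl_insertBy
    (R := fun (a b : Int × Int) => a.1 ≤ b.1)
    (before := fun a b => decide (a.1 < b.1) || !decide (b.1 < a.1) && decide (a.2 < b.2))
    (fun a b c hab hbc => le_trans hab hbc)
    (fun a b => by
      constructor
      · intro h
        simp only [Bool.or_eq_true, Bool.and_eq_true, Bool.not_eq_true',
          decide_eq_true_eq, decide_eq_false_iff_not] at h
        rcases h with h | ⟨h, _⟩
        · exact le_of_lt h
        · exact not_lt.mp h
      · intro h
        by_contra hc
        have hlt : a.1 < b.1 := not_le.mp hc
        simp [hlt] at h)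
    xs [] (by simp)
  simpa [PySem.List.sorted2] using this

-- the per-skill contribution of B equals pvVal
lemma pvB_val (jobs : List (Int × Int)) (hjp : jobs.Pairwise (fun a b => a.1 ≤ b.1)) (s : Int) :
    (if PySem.List.bisectRight (jobs.map Prod.fst) s ≠ 0 then
        (pvBest 0 jobs).getD (PySem.List.bisectRight (jobs.map Prod.fst) s - 1) 0
      else 0) = pvVal jobs s := by
  have hdp : (jobs.map Prod.fst).Pairwise (· ≤ ·) := List.Pairwise.map _ (fun a b h => h) hjp
  have hbt := pv_bisect_eq_takeWhile (jobs.map Prod.fst) s hdp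
  have htwm : (jobs.map Prod.fst).takeWhile (fun a => decide (a ≤ s))
      = (jobs.takeWhile (fun j => decide (j.1 ≤ s))).map Prod.fst := by
    rw [List.takeWhile_map]
    rfl
  set t := (jobs.takeWhile (fun j => decide (j.1 ≤ s))).length with htt
  have hbi : PySem.List.bisectRight (jobs.map Prod.fst) s = t := by
    rw [hbt, htwm, List.length_map]
  have htle : t ≤ jobs.length := by
    rw [htt]; exact pv_length_takeWhile_le _ jobs
  have htake : jobs.take t = jobs.takeWhile (fun j => decide (j.1 ≤ s)) := by
    rw [htt, pv_take_takeWhile]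
  rw [hbi]
  by_cases h0 : t = 0
  · simp [pvVal, ← htake, h0]
  · have ht1 : t - 1 < jobs.length := by omega
    have hg := pvBest_getElem? jobs 0 (t - 1) ht1
    have : (pvBest 0 jobs).getD (t - 1) 0
        = ((jobs.take t).map Prod.snd).foldl max 0 := by
      rw [List.getD_eq_getElem?_getD, hg]
      simp [Nat.sub_add_cancel (Nat.one_le_iff_ne_zero.mpr h0)]
    rw [if_pos h0, this, htake, pvVal]

-- sum shape of B's outer fold
lemma pv_foldl_add_map {α : Type} (f : α → Int) :
    ∀ (ws : List α) (c : Int), ws.foldl (fun t s => t + f s) c = c + (ws.map f).sum := by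
  intro ws
  induction ws with
  | nil => intro c; simp
  | cons s rest ih => intro c; simp [ih]; ring

-- ===== VERDICT (by name: the statement is the Claim_ definition above) =====
theorem max_profit_worker_spec : Claim_equal_max_profit_worker := by
  unfold Claim_equal_max_profit_worker
  intro difficulty profit worker _
  unfold Spec_max_profit_worker max_profit_worker max_profit_worker_alt
  set jobs := PySem.List.sorted2 (difficulty.zip profit) Prod.fst Prod.snd with hjobs
  have hjp : jobs.Pairwise (fun a b => a.1 ≤ b.1) := pv_jobs_pairwise _
  -- A's side
  have hA : pvALoop (PySem.List.sorted worker (fun x => x)) jobs 0 0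
      = ((PySem.List.sorted worker (fun x => x)).map (pvVal jobs)).sum := by
    have := pvALoop_eq jobs (PySem.List.sorted worker (fun x => x))
      (PySem.List.sorted_pairwise worker (fun x => x)) [] jobs 0 (by simp) (by simp)
    simpa using this
  -- B's side
  have hB : (worker.foldl (fun total s =>
      let i := PySem.List.bisectRight (jobs.map Prod.fst) s
      if i ≠ 0 then total + ((jobs.foldl (fun (acc : List Int × Int) j =>
          (acc.1 ++ [max acc.2 j.2], max acc.2 j.2)) ([], 0)).1).getD (i - 1) 0
      else total) 0)
      = (worker.map (pvVal jobs)).sum := by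
    have hbest : (jobs.foldl (fun (acc : List Int × Int) j =>
        (acc.1 ++ [max acc.2 j.2], max acc.2 j.2)) ([], 0)).1 = pvBest 0 jobs := by
      simp [pvBestFold]
    calc (worker.foldl (fun total s =>
            let i := PySem.List.bisectRight (jobs.map Prod.fst) s
            if i ≠ 0 then total + ((jobs.foldl (fun (acc : List Int × Int) j =>
                (acc.1 ++ [max acc.2 j.2], max acc.2 j.2)) ([], 0)).1).getD (i - 1) 0
            else total) 0)
        = worker.foldl (fun t s => t + pvVal jobs s) 0 := by
            have hfun : (fun (total s : Int) =>
                let i := PySem.List.bisectRight (jobs.map Prod.fst) s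
                if i ≠ 0 then total + ((jobs.foldl (fun (acc : List Int × Int) j =>
                    (acc.1 ++ [max acc.2 j.2], max acc.2 j.2)) ([], 0)).1).getD (i - 1) 0
                else total)
                = fun (t s : Int) => t + pvVal jobs s := by
              funext t s
              simp only [hbest]
              rw [← pvB_val jobs hjp s]
              by_cases h : PySem.List.bisectRight (jobs.map Prod.fst) s ≠ 0 <;> simp [h]
            rw [hfun]
      _ = (worker.map (pvVal jobs)).sum := by
            have := pv_foldl_add_map (pvVal jobs) worker 0
            simpa using this
  -- tie the two sums together through the permutation sorted worker ~ worker
  have hperm : ((PySem.List.sorted worker (fun x => x)).map (pvVal jobs)).Perm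
      (worker.map (pvVal jobs)) :=
    (PySem.List.sorted_perm worker (fun x => x) false).map _
  simp only [hA, hB]
  exact hperm.sum_eq
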